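-- pv_equiv track=rewrite | github.com/Mayistikar/Python-Algoritmos_y_programacion | 6.8.3.modificacion_ptoanterior.py | remplazar_caracteres
-- ===== SOURCE A (Python) =====
-- def remplazar_caracteres(cadena, caracter, cantidad):
-- 	"""
-- 	Dada una cadena esta funcion inserta X por cada Caracter
-- 	modifica la cadena SOLO hasta la posicion "cantidad"
-- 	PARAMETROS:
-- 		una cadena string
-- 	RETORNO:
-- 		una cadena string
-- 	"""
-- 	lista=""
-- 	for pos in range(len(cadena)):
-- 		if pos<cantidad:
-- 			lista+=caracter
-- 		else:
-- 			lista+=cadena[pos]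
-- 	return "Su clave es "+lista
-- ===== SOURCE B (Python) =====
-- def remplazar_caracteres(cadena, caracter, cantidad):
--     r = max(0, min(cantidad, len(cadena)))
--     return "Su clave es " + caracter * r + cadena[r:]
-- ===== Notes on version B (the rewrite author's own statement) =====
-- stated objective: simpler
-- what changed: Replaces the per-position loop with the closed-form expression caracter*r + cadena[r:] where r clamps cantidad into [0, len(cadena)].
import Mathlib
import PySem

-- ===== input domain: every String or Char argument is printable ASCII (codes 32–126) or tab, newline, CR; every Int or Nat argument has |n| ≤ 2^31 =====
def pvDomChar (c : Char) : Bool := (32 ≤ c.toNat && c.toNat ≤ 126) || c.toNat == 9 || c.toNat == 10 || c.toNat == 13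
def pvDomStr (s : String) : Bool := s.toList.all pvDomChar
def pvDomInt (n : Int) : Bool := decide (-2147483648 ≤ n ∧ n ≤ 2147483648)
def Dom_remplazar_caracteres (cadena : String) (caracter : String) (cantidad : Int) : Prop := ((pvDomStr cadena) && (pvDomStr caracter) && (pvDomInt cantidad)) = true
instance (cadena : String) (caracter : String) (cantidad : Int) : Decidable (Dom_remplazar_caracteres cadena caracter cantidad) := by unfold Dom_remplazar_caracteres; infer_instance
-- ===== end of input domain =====

-- B replaces A's per-position loop by a closed-form clamp: "Su clave es " + caracter*r + cadena[r:], r = max(0, min(cantidad, len)); objective: simpler.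


-- ===== PORT A =====
-- for pos in range(len(cadena)): lista += caracter if pos < cantidad else cadena[pos]
def remplazar_caracteres (cadena : String) (caracter : String) (cantidad : Int) : String :=
  let lista : List Char :=
    (PySem.List.pyRange 0 (cadena.toList.length : Int) 1).foldl
      (fun acc pos =>
        if pos < cantidad then acc ++ caracter.toList
        else acc ++ (PySem.List.pyGet? cadena.toList pos).elim [] (fun c => [c]))
      []
  String.ofList ("Su clave es ".toList ++ lista)

-- ===== PORT B =====
-- r = max(0, min(cantidad, len(cadena))); "Su clave es " + caracter*r + cadena[r:]
def remplazar_caracteres_alt (cadena : String) (caracter : String) (cantidad : Int) : String :=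
  let r : Int := max 0 (min cantidad (cadena.toList.length : Int))
  String.ofList ("Su clave es ".toList
    ++ (List.replicate r.toNat caracter.toList).flatten
    ++ PySem.List.slice cadena.toList (some r) none)

-- ===== PRECONDITION & SPEC =====
def Spec_remplazar_caracteres (cadena : String) (caracter : String) (cantidad : Int) (out : String) : Prop := out = remplazar_caracteres_alt cadena caracter cantidad
instance (cadena : String) (caracter : String) (cantidad : Int) (out : String) : Decidable (Spec_remplazar_caracteres cadena caracter cantidad out) := by unfold Spec_remplazar_caracteres; infer_instance

-- ===== CLAIM (what is proved, stated in full; the proofs are below) =====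
def Claim_equal_remplazar_caracteres : Prop := ∀ (cadena : String) (caracter : String) (cantidad : Int), Dom_remplazar_caracteres cadena caracter cantidad → Spec_remplazar_caracteres cadena caracter cantidad (remplazar_caracteres cadena caracter cantidad)

-- ===== LEMMAS AND PROOFS =====

-- a fold that always appends the constant block C produces replicate-flatten
theorem pv_foldl_const {β : Type} (C : List Char) :
    ∀ (l : List β) (acc : List Char),
      l.foldl (fun a _ => a ++ C) acc = acc ++ (List.replicate l.length C).flatten := by
  intro l
  induction l with
  | nil => intro acc; simp
  | cons x xs ih => intro acc; simp [List.foldl, ih, List.replicate_succ]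

-- a fold over range a..len that appends full[pos] at each pos copies the suffix full.drop a
theorem pv_foldl_copy (full : List Char) :
    ∀ (a : Nat) (acc : List Char), a ≤ full.length →
      (PySem.List.pyRange (a : Int) (full.length : Int) 1).foldl
        (fun acc pos => acc ++ (PySem.List.pyGet? full pos).elim [] (fun c => [c])) acc
      = acc ++ full.drop a := by
  intro a
  induction hk : full.length - a generalizing a with
  | zero =>
    intro acc ha
    have h : full.length ≤ a := by omega
    rw [PySem.List.pyRange_one_eq_nil (by exact_mod_cast h)]
    simp [List.drop_eq_nil_of_le h]
  | succ k ih =>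
    intro acc ha
    have hlt : a < full.length := by omega
    rw [PySem.List.pyRange_one_cons (by exact_mod_cast hlt)]
    simp only [List.foldl_cons]
    have hget : PySem.List.pyGet? full (a : Int) = some full[a] := by
      rw [PySem.List.pyGet?_natCast]; simp [List.getElem?_eq_getElem hlt]
    rw [hget]
    have hcast : ((a : Int) + 1) = ((a + 1 : Nat) : Int) := by push_cast; ring
    rw [hcast, ih (a + 1) (by omega) _ (by omega)]
    rw [List.drop_eq_getElem_cons hlt]
    simp

-- the whole loop equals replicate-flatten ++ drop at the clamped count
theorem pv_list (L C : List Char) (cantidad : Int) :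
    (PySem.List.pyRange 0 (L.length : Int) 1).foldl
      (fun acc pos =>
        if pos < cantidad then acc ++ C
        else acc ++ (PySem.List.pyGet? L pos).elim [] (fun c => [c])) []
    = (List.replicate (max 0 (min cantidad (L.length : Int))).toNat C).flatten
      ++ PySem.List.slice L (some (max 0 (min cantidad (L.length : Int)))) none := by
  set rI : Int := max 0 (min cantidad (L.length : Int)) with hrI
  have hr0 : 0 ≤ rI := le_max_left _ _
  have hrlen : rI ≤ (L.length : Int) := by omega
  set r : Nat := rI.toNat with hr
  have hrle : r ≤ L.length := by omega
  have hrcast : (r : Int) = rI := by omega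
  have hsplit : PySem.List.pyRange 0 (L.length : Int) 1
      = PySem.List.pyRange 0 (r : Int) 1 ++ PySem.List.pyRange (r : Int) (L.length : Int) 1 :=
    PySem.List.pyRange_one_append 0 (r : Int) (L.length : Int) (by omega) (by exact_mod_cast hrle)
  rw [hsplit, List.foldl_append]
  have h1 : (PySem.List.pyRange 0 (r : Int) 1).foldl
      (fun acc pos =>
        if pos < cantidad then acc ++ C
        else acc ++ (PySem.List.pyGet? L pos).elim [] (fun c => [c])) []
      = (List.replicate r C).flatten := by
    rw [PySem.List.foldl_congr_mem _ _ (fun acc (_ : Int) => acc ++ C) _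
      (by
        intro acc x hx
        have hx' := (PySem.List.mem_pyRange_one).mp hx
        have hxc : x < cantidad := by omega
        simp [hxc])]
    rw [pv_foldl_const]
    simp [PySem.List.length_pyRange_one]
  have h2 : (PySem.List.pyRange (r : Int) (L.length : Int) 1).foldl
      (fun acc pos =>
        if pos < cantidad then acc ++ C
        else acc ++ (PySem.List.pyGet? L pos).elim [] (fun c => [c])) ((List.replicate r C).flatten)
      = (List.replicate r C).flatten ++ L.drop r := by
    rw [PySem.List.foldl_congr_mem _ _
      (fun acc pos => acc ++ (PySem.List.pyGet? L pos).elim [] (fun c => [c])) _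
      (by
        intro a x hx
        have hx' := (PySem.List.mem_pyRange_one).mp hx
        have hxc : ¬ x < cantidad := by omega
        simp [hxc])]
    exact pv_foldl_copy L r _ hrle
  rw [h1, h2]
  rw [PySem.List.slice_from L hr0]

theorem pv_main (cadena caracter : String) (cantidad : Int) :
    remplazar_caracteres cadena caracter cantidad = remplazar_caracteres_alt cadena caracter cantidad := by
  unfold remplazar_caracteres remplazar_caracteres_alt
  dsimp only
  rw [pv_list cadena.toList caracter.toList cantidad]
  simp

-- ===== VERDICT (by name: the statement is the Claim_ definition above) =====
theorem remplazar_caracteres_spec : Claim_equal_remplazar_caracteres := by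
  intro cadena caracter cantidad _
  exact pv_main cadena caracter cantidad
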